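-- pv_equiv track=rewrite | github.com/pypi-data/pypi-mirror-404 | packages/Rubka/rubka-7.5.1-py3-none-any.whl/rubka/metadata.py | _normalize_multiline_quote
-- ===== SOURCE A (Python) =====
-- def _normalize_multiline_quote(text: str) -> str:
--     lines = text.splitlines()
--     normalized_lines = []
--     quote_block = []
--
--     for line in lines + [""]:
--         if line.startswith(">"):quote_block.append(line[1:].strip())
--         else:
--             if quote_block:
--                 normalized_lines.append("$" + "\n".join(quote_block) + "$")
--                 quote_block = []
--             normalized_lines.append(line)
--     return "\n".join(normalized_lines).strip()
-- ===== SOURCE B (Python) =====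
-- def _normalize_multiline_quote(text: str) -> str:
--     lines = text.splitlines()
--     out = []
--     i = 0
--     n = len(lines)
--     while i < n:
--         if lines[i].startswith(">"):
--             j = i + 1
--             while j < n and lines[j].startswith(">"):
--                 j += 1
--             out.append("$" + "\n".join(l[1:].strip() for l in lines[i:j]) + "$")
--             i = j
--         else:
--             out.append(lines[i])
--             i += 1
--     return "\n".join(out).strip()
-- ===== Notes on version B (the rewrite author's own statement) =====
-- stated objective: alternative
-- what changed: Replaces A's one-pass state machine (quote_block accumulator plus a trailing sentinel line to force the final flush) by index-based run grouping: an inner scan finds each maximal run of quote-marker lines and emits its block directly, so no pending state or sentinel exists.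
import Mathlib
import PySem

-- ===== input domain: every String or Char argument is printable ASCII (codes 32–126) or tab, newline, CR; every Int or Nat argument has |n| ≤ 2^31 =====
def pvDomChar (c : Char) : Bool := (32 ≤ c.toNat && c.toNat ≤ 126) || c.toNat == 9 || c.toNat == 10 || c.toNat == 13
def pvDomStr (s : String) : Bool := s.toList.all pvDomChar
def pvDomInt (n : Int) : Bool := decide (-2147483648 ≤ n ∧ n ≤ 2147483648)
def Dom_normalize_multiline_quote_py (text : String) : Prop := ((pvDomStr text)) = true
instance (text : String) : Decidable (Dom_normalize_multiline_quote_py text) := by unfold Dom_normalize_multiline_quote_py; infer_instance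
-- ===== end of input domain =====

-- B replaces A's pending-accumulator state machine (with its trailing "" sentinel) by
-- index-free run grouping: each maximal quote run is found by an inner scan and
-- emitted directly (objective: alternative; return values only, no mutation involved).

-- ===== PORT A =====
-- A's loop body, named so the fold can be reasoned about; a literal transcription.
def pvStepA (st : List String × List String) (line : String) : List String × List String :=
  if PySem.Str.startswith line ">" then
    (st.1, st.2 ++ [PySem.Str.strip (PySem.Str.slice line (some 1) none)])
  else
    let nl := if st.2.isEmpty then st.1 else st.1 ++ ["$" ++ PySem.Str.join "\n" st.2 ++ "$"]
    (nl ++ [line], [])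

def normalize_multiline_quote_py (text : String) : String :=
  let lines := PySem.Str.splitlines text
  PySem.Str.strip (PySem.Str.join "\n" ((lines ++ [""]).foldl pvStepA ([], [])).1)

-- ===== PORT B =====
def pvIsQuote (l : String) : Bool := PySem.Str.startswith l ">"

def pvQuoteItem (l : String) : String := PySem.Str.strip (PySem.Str.slice l (some 1) none)

-- Source B's outer loop: on a '>'-line, the inner scan takes the rest of the run.
def pvGo : List String → List String
  | [] => []
  | l :: ls =>
    if pvIsQuote l then
      ("$" ++ PySem.Str.join "\n" ((l :: ls.takeWhile pvIsQuote).map pvQuoteItem) ++ "$")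
        :: pvGo (ls.dropWhile pvIsQuote)
    else
      l :: pvGo ls
termination_by ls => ls.length
decreasing_by
  · exact Nat.lt_succ_of_le (List.length_dropWhile_le _ _)
  · simp

def normalize_multiline_quote_py_alt (text : String) : String :=
  PySem.Str.strip (PySem.Str.join "\n" (pvGo (PySem.Str.splitlines text)))

-- ===== PRECONDITION & SPEC =====
def Spec_normalize_multiline_quote_py (text : String) (out : String) : Prop := out = normalize_multiline_quote_py_alt text
instance (text : String) (out : String) : Decidable (Spec_normalize_multiline_quote_py text out) := by unfold Spec_normalize_multiline_quote_py; infer_instance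

-- ===== CLAIM (what is proved, stated in full; the proofs are below) =====
def Claim_equal_normalize_multiline_quote_py : Prop := ∀ (text : String), Dom_normalize_multiline_quote_py text → Spec_normalize_multiline_quote_py text (normalize_multiline_quote_py text)

-- ===== LEMMAS AND PROOFS =====

-- flush of A's pending quote block, as a list of output lines
def pvFlush (qb : List String) : List String :=
  if qb.isEmpty then [] else ["$" ++ PySem.Str.join "\n" qb ++ "$"]

-- A's loop rephrased with the pending block made explicit
def pvGoB (qb : List String) : List String → List String
  | [] => pvFlush qb
  | l :: ls =>
    if pvIsQuote l then pvGoB (qb ++ [pvQuoteItem l]) ls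
    else pvFlush qb ++ l :: pvGoB [] ls

theorem pvStartswith_empty : PySem.Str.startswith "" ">" = false := by decide

theorem pvFoldA (ls : List String) : ∀ (acc qb : List String),
    (ls ++ [""]).foldl pvStepA (acc, qb) = (acc ++ pvGoB qb ls ++ [""], []) := by
  induction ls with
  | nil =>
    intro acc qb
    simp only [List.nil_append, List.foldl_cons, List.foldl_nil, pvStepA,
      pvStartswith_empty, Bool.false_eq_true, if_false, pvGoB, pvFlush]
    by_cases h : qb.isEmpty <;> simp [h]
  | cons l ls ih =>
    intro acc qb
    by_cases h : pvIsQuote l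
    · simp only [List.cons_append, List.foldl_cons, pvStepA, pvIsQuote] at h ⊢
      rw [if_pos h, ih, pvGoB, pvIsQuote, if_pos h]
      simp [pvQuoteItem]
    · simp only [List.cons_append, List.foldl_cons, pvStepA, pvIsQuote] at h ⊢
      rw [if_neg h, ih, pvGoB, pvIsQuote, if_neg h]
      by_cases hq : qb.isEmpty <;> simp [hq, pvFlush]

theorem pvGoB_eq (ls : List String) : ∀ (qb : List String),
    pvGoB qb ls =
      if qb.isEmpty then pvGo ls
      else ("$" ++ PySem.Str.join "\n" (qb ++ (ls.takeWhile pvIsQuote).map pvQuoteItem) ++ "$")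
             :: pvGo (ls.dropWhile pvIsQuote) := by
  induction ls with
  | nil =>
    intro qb
    by_cases h : qb.isEmpty <;> simp [pvGoB, pvFlush, h, pvGo]
  | cons l ls ih =>
    intro qb
    by_cases h : pvIsQuote l
    · rw [pvGoB, if_pos h, ih]
      by_cases hq : qb.isEmpty
      · have hq' : qb = [] := by simpa [List.isEmpty_iff] using hq
        subst hq'
        simp [pvGo, h]
      · have : (qb ++ [pvQuoteItem l]).isEmpty = false := by simp
        simp [this, hq, h]
    · rw [pvGoB, if_neg h, ih []]
      by_cases hq : qb.isEmpty
      · have hq' : qb = [] := by simpa [List.isEmpty_iff] using hq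
        subst hq'
        simp [pvGo, h, pvFlush]
      · simp [hq, pvFlush, h, pvGo]

theorem pvJoin_append_empty (sep : List Char) (a : List Char) (t : List (List Char)) :
    PySem.Chars.join sep (a :: (t ++ [[]])) = PySem.Chars.join sep (a :: t) ++ sep := by
  induction t generalizing a with
  | nil =>
    rw [List.nil_append, PySem.Chars.join_cons_cons,
      PySem.Chars.join_singleton, PySem.Chars.join_singleton, List.append_nil]
  | cons b t ih =>
    rw [show b :: t ++ [[]] = b :: (t ++ [([] : List Char)]) from rfl,
      PySem.Chars.join_cons_cons, ih, PySem.Chars.join_cons_cons]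
    simp [List.append_assoc]

theorem pvIsspace_nl : PySem.Chars.isspace '\n' = true := by decide

theorem pvRstrip_newline (s : List Char) :
    PySem.Chars.rstrip (s ++ ['\n']) = PySem.Chars.rstrip s := by
  simp [PySem.Chars.rstrip, pvIsspace_nl]

theorem pvStrip_newline (s : List Char) :
    PySem.Chars.strip (s ++ ['\n']) = PySem.Chars.strip s := by
  simp only [PySem.Chars.strip, PySem.Chars.lstrip, List.dropWhile_append]
  by_cases h : (List.dropWhile PySem.Chars.isspace s).isEmpty
  · simp [pvIsspace_nl, PySem.Chars.rstrip, List.isEmpty_iff.mp h]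
  · simp only [h, if_false, Bool.false_eq_true]
    exact pvRstrip_newline _

theorem pvStrip_join_empty (xs : List String) :
    PySem.Str.strip (PySem.Str.join "\n" (xs ++ [""])) =
      PySem.Str.strip (PySem.Str.join "\n" xs) := by
  have h : (PySem.Str.strip (PySem.Str.join "\n" (xs ++ [""]))).toList =
      (PySem.Str.strip (PySem.Str.join "\n" xs)).toList := by
    rw [PySem.Str.toList_strip, PySem.Str.toList_strip, PySem.Str.toList_join,
      PySem.Str.toList_join]
    cases xs with
    | nil => rfl
    | cons a t =>
      have : List.map String.toList ((a :: t) ++ [""]) =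
          a.toList :: (List.map String.toList t ++ [[]]) := by simp
      rw [this, pvJoin_append_empty, List.map_cons]
      exact pvStrip_newline _
  calc PySem.Str.strip (PySem.Str.join "\n" (xs ++ [""]))
      = String.ofList (PySem.Str.strip (PySem.Str.join "\n" (xs ++ [""]))).toList :=
        String.ofList_toList.symm
    _ = String.ofList (PySem.Str.strip (PySem.Str.join "\n" xs)).toList := by rw [h]
    _ = PySem.Str.strip (PySem.Str.join "\n" xs) := String.ofList_toList

-- ===== VERDICT (by name: the statement is the Claim_ definition above) =====
theorem normalize_multiline_quote_py_spec : Claim_equal_normalize_multiline_quote_py := by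
  intro text _
  unfold Spec_normalize_multiline_quote_py normalize_multiline_quote_py
    normalize_multiline_quote_py_alt
  simp only []
  rw [pvFoldA _ [] []]
  simp only [List.nil_append]
  rw [pvGoB_eq]
  simp only [List.isEmpty_nil, if_true]
  exact pvStrip_join_empty _
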